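-- pv_equiv track=rewrite | github.com/Errare-humanum-est/HieraGen | Murphi/ModularMurphi/GenNetworkRules.py | gen_if_elif_structure
-- ===== SOURCE A (Python) =====
-- from typing import List, Tuple
--
-- def gen_if_elif_structure(archs: List[str]) -> List[Tuple[str, str]]:
--     cond = []
--     for ind in range(0, len(archs)):
--         if ind == 0:
--             cond.append(('if', archs[ind]))
--         else:
--             cond.append(('elsif', archs[ind]))
--         if ind == len(archs)-1:
--             cond.append(('else', None))
--     return cond
-- ===== SOURCE B (Python) =====
-- def gen_if_elif_structure(archs):
--     # Build the conditional chain back-to-front: start from the terminal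
--     # ('else', None), push 'elsif' entries while walking archs in reverse,
--     # retag the last-pushed entry (the chain head) as 'if', then reverse.
--     out = [('else', None)] if archs else []
--     for a in reversed(archs):
--         out.append(('elsif', a))
--     if out:
--         out[-1] = ('if', out[-1][1])
--     out.reverse()
--     return out
-- ===== Notes on version B (the rewrite author's own statement) =====
-- stated objective: alternative
-- what changed: Replaced the forward index-driven loop (which tests first/last-index conditions each iteration) with back-to-front construction: start from the terminal ('else', None), push 'elsif' entries while traversing archs in reverse, retag the last-pushed entry as 'if', then reverse the accumulator.
import Mathlib
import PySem

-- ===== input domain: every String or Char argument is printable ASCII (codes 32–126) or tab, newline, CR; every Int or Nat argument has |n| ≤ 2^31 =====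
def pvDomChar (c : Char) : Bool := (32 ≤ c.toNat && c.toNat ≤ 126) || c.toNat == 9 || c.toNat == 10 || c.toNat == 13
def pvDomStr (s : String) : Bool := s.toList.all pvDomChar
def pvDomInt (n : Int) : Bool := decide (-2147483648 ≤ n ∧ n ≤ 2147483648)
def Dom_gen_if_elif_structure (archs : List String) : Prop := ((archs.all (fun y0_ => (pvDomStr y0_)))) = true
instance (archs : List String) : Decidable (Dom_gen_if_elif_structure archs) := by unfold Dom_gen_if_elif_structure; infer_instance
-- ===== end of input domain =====

-- B builds the chain back-to-front (push else, then elsif's over reversed input, retag head, reverse) instead of A's forward index loop; objective: alternative decomposition, same cost.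


-- ===== PORT A =====
def gen_if_elif_structure (archs : List String) : List (String × Option String) :=
  (PySem.List.pyRange 0 (archs.length : Int) 1).foldl
    (fun cond ind =>
      let cond := if ind = 0 then cond ++ [("if", PySem.List.pyGet? archs ind)]
                  else cond ++ [("elsif", PySem.List.pyGet? archs ind)]
      if ind = (archs.length : Int) - 1 then cond ++ [("else", none)] else cond)
    []

-- ===== PORT B =====
def gen_if_elif_structure_alt (archs : List String) : List (String × Option String) :=
  let out := if archs ≠ [] then [(("else" : String), (none : Option String))] else []
  let out := archs.reverse.foldl (fun o a => o ++ [("elsif", some a)]) out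
  let out := match out.getLast? with
    | none => out
    | some last => out.dropLast ++ [("if", last.2)]
  out.reverse

-- ===== PRECONDITION & SPEC =====
def Spec_gen_if_elif_structure (archs : List String) (out : List (String × Option String)) : Prop := out = gen_if_elif_structure_alt archs
instance (archs : List String) (out : List (String × Option String)) : Decidable (Spec_gen_if_elif_structure archs out) := by unfold Spec_gen_if_elif_structure; infer_instance

-- ===== CLAIM (what is proved, stated in full; the proofs are below) =====
def Claim_equal_gen_if_elif_structure : Prop := ∀ (archs : List String), Dom_gen_if_elif_structure archs → Spec_gen_if_elif_structure archs (gen_if_elif_structure archs)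

-- ===== LEMMAS AND PROOFS =====

-- canonical shape both ports are proved equal to (proof-only helper)
def pvCanon (archs : List String) : List (String × Option String) :=
  match archs with
  | [] => []
  | h :: t => ("if", some h) :: (t.map (fun a => ("elsif", some a)) ++ [("else", none)])

-- A's loop body appends chunks; rewrite the fold as a flatMap of per-index chunks.
theorem body_eq (fi fe : Int → String × Option String) (e : String × Option String) (m : Int) :
    ∀ (l : List Int) (acc : List (String × Option String)),
    l.foldl (fun cond ind =>
        let cond := if ind = 0 then cond ++ [fi ind] else cond ++ [fe ind]
        if ind = m then cond ++ [e] else cond) acc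
    = acc ++ l.flatMap (fun ind =>
        (if ind = 0 then [fi ind] else [fe ind]) ++ (if ind = m then [e] else [])) := by
  intro l
  induction l with
  | nil => simp
  | cons x xs ih =>
    intro acc
    simp only [List.foldl_cons, List.flatMap_cons]
    rw [ih]
    split_ifs <;> simp [List.append_assoc]

-- the trailing ('else', None) chunk fires only at an index not occurring in the prefix range
theorem flatMap_ite_notmem {α β : Type} [DecidableEq α] (l : List α) (m : α) (hl : m ∉ l)
    (f : α → List β) (e : List β) :
    l.flatMap (fun i => f i ++ if i = m then e else []) = l.flatMap f := by
  induction l with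
  | nil => rfl
  | cons x xs ih =>
    simp only [List.mem_cons, not_or] at hl
    simp [List.flatMap_cons, ih hl.2, Ne.symm hl.1]

-- indices 0..j-1 of u pick out exactly u.take j
theorem range_get (u : List String) (j : Nat) (hj : j ≤ u.length) :
    (List.range j).map (fun (k : Nat) => (("elsif" : String), PySem.List.pyGet? u (k : Int)))
    = (u.take j).map (fun a => ("elsif", some a)) := by
  induction j with
  | zero => simp
  | succ j ih =>
    rw [List.range_succ, List.map_append, ih (Nat.le_of_succ_le hj)]
    have hjl : j < u.length := hj
    rw [List.take_add_one, List.map_append, List.map_cons, PySem.List.pyGet?_natCast,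
      List.getElem?_eq_getElem hjl]
    simp

theorem a_eq_canon (xs : List String) :
    gen_if_elif_structure xs = pvCanon xs := by
  match xs with
  | [] => rfl
  | h :: t =>
    unfold gen_if_elif_structure
    rw [body_eq]
    have hn : ((h :: t).length : Int) = (t.length : Int) + 1 := by simp
    have hm : ((h :: t).length : Int) - 1 = (t.length : Int) := by simp
    have hsplit : PySem.List.pyRange 0 ((h :: t).length : Int) 1
        = PySem.List.pyRange 0 ((t.length : Int)) 1 ++ [(t.length : Int)] := by
      rw [hn]
      exact PySem.List.pyRange_one_succ_right (by positivity)
    rw [hsplit, List.flatMap_append, hm]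
    have hnot : ((t.length : Int)) ∉ PySem.List.pyRange 0 ((t.length : Int)) 1 := by
      intro hmem
      rw [PySem.List.mem_pyRange_one] at hmem
      omega
    rw [flatMap_ite_notmem _ _ hnot]
    have htagmap : ∀ (l : List Int),
        l.flatMap (fun ind => if ind = 0 then [(("if" : String), PySem.List.pyGet? (h :: t) ind)]
                              else [("elsif", PySem.List.pyGet? (h :: t) ind)])
        = l.map (fun ind => ((if ind = 0 then "if" else "elsif"), PySem.List.pyGet? (h :: t) ind)) := by
      intro l
      induction l with
      | nil => rfl
      | cons x xs ih =>
        simp only [List.flatMap_cons, ih, List.map_cons]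
        split_ifs <;> simp
    rw [htagmap]
    have hrange1 : PySem.List.pyRange 0 ((t.length : Int)) 1
        = (List.range t.length).map (fun (k : Nat) => (k : Int)) := by
      rw [PySem.List.pyRange_one]
      simp
    rw [hrange1, List.map_map]
    match t with
    | [] =>
      simp [pvCanon]
    | a :: t' =>
      have hlen0 : (((a :: t').length : Int)) ≠ 0 := by
        simp only [List.length_cons]
        push_cast
        omega
      simp only [List.flatMap_cons, List.flatMap_nil, List.append_nil, List.nil_append]
      rw [if_neg hlen0]
      simp only [if_true]
      rw [List.length_cons, List.range_succ_eq_map, List.map_cons, List.map_map]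
      have hhead : ((fun ind => ((if ind = 0 then ("if" : String) else "elsif"),
            PySem.List.pyGet? (h :: a :: t') ind)) ∘ (fun (k : Nat) => (k : Int))) 0
          = ("if", some h) := by
        simp [PySem.List.pyGet?_zero_cons]
      rw [hhead]
      have htail : (List.range t'.length).map
            (((fun ind => ((if ind = 0 then ("if" : String) else "elsif"),
              PySem.List.pyGet? (h :: a :: t') ind)) ∘ (fun (k : Nat) => (k : Int))) ∘ Nat.succ)
          = (List.range t'.length).map
            (fun (k : Nat) => (("elsif" : String), PySem.List.pyGet? (a :: t') (k : Int))) := by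
        apply List.map_congr_left
        intro k _
        have h1 : ((Nat.succ k : Nat) : Int) = (k : Int) + 1 := by push_cast; ring
        have h2 : ((k : Int) + 1) ≠ 0 := by omega
        simp only [Function.comp, h1, if_neg h2]
        rw [PySem.List.pyGet?_cons_succ]
      rw [htail, range_get (a :: t') t'.length (by simp)]
      have hlast : PySem.List.pyGet? (h :: a :: t') (((t'.length + 1 : Nat) : Int))
          = some ((a :: t')[t'.length]) := by
        have h1 : ((t'.length + 1 : Nat) : Int) = ((t'.length : Nat) : Int) + 1 := by
          push_cast; ring
        rw [h1, PySem.List.pyGet?_cons_succ, PySem.List.pyGet?_natCast]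
        exact List.getElem?_eq_getElem (by simp)
      rw [hlast]
      have hsplit2 : (a :: t').take t'.length ++ [(a :: t')[t'.length]] = a :: t' := by
        have h3 := List.take_add_one (l := a :: t') (i := t'.length)
        rw [List.getElem?_eq_getElem (by simp : t'.length < (a :: t').length)] at h3
        exact h3.symm.trans (by simp)
      have hmap : ((a :: t').take t'.length).map (fun x => (("elsif" : String), some x))
            ++ [("elsif", some ((a :: t')[t'.length]))]
          = (a :: t').map (fun x => ("elsif", some x)) := by
        conv_rhs => rw [← hsplit2]
        rw [List.map_append]
        simp only [List.map_cons, List.map_nil]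
      rw [← List.append_assoc, List.cons_append, hmap]
      simp [pvCanon]

theorem foldl_app_singleton {α β : Type} (f : α → β) :
    ∀ (l : List α) (acc : List β),
    l.foldl (fun o a => o ++ [f a]) acc = acc ++ l.map f := by
  intro l
  induction l with
  | nil => simp
  | cons x xs ih =>
    intro acc
    simp [List.foldl_cons, ih, List.append_assoc]

theorem b_eq_canon (xs : List String) :
    gen_if_elif_structure_alt xs = pvCanon xs := by
  match xs with
  | [] => rfl
  | h :: t =>
    unfold gen_if_elif_structure_alt
    simp only [ne_eq, reduceCtorEq, not_false_iff, if_pos, List.reverse_cons,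
      foldl_app_singleton, List.map_append, List.map_cons, List.map_nil]
    have hshape : ([(("else" : String), (none : Option String))]
          ++ (t.reverse.map (fun a => (("elsif" : String), some a)) ++ [("elsif", some h)]))
        = (("else", none) :: t.reverse.map (fun a => (("elsif" : String), some a)))
          ++ [("elsif", some h)] := by
      simp
    rw [hshape, List.getLast?_concat, List.dropLast_concat]
    simp [pvCanon, List.map_reverse]

-- ===== VERDICT (by name: the statement is the Claim_ definition above) =====
theorem gen_if_elif_structure_spec : Claim_equal_gen_if_elif_structure := by
  intro archs _
  unfold Spec_gen_if_elif_structure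
  rw [a_eq_canon, b_eq_canon]
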